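-- pv_equiv track=rewrite | github.com/ytakata69/icpc | 2023/b.py | result
-- ===== SOURCE A (Python) =====
-- def update(p, h):
--     return p - 1 if h == p - 1 else (p + 1 if h == p else p)
--
-- def result(x, p, vpos = -1, hpos = 0):
--     for i, xi in enumerate(x):
--         if i == vpos:
--             p = update(p, hpos)
--         p = update(p, xi)
--
--     if len(x) == vpos:
--         p = update(p, hpos)
--     return p
-- ===== SOURCE B (Python) =====
-- def result(x, p, vpos=-1, hpos=0):
--     # Build the full swap sequence, then compose all adjacent swaps into a
--     # sparse permutation (fwd) with its inverse (inv); answer is one lookup.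
--     seq = list(x)
--     if 0 <= vpos <= len(x):
--         seq.insert(vpos, hpos)
--     fwd = {}  # position -> its image under the swaps applied so far
--     inv = {}  # image -> position (inverse of fwd)
--     for h in seq:
--         a = inv.get(h, h)
--         b = inv.get(h + 1, h + 1)
--         fwd[a] = h + 1
--         fwd[b] = h
--         inv[h] = b
--         inv[h + 1] = a
--     return fwd.get(p, p)
-- ===== Notes on version B (the rewrite author's own statement) =====
-- stated objective: alternative
-- what changed: Instead of threading the tracked position p through each update (A's per-element token tracking), B builds the full swap sequence once (inserting hpos at vpos when 0<=vpos<=len(x)) and composes all adjacent swaps into a sparse permutation dictionary with its maintained inverse, answering with a single lookup fwd.get(p, p); the update helper disappears entirely.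
import Mathlib
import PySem

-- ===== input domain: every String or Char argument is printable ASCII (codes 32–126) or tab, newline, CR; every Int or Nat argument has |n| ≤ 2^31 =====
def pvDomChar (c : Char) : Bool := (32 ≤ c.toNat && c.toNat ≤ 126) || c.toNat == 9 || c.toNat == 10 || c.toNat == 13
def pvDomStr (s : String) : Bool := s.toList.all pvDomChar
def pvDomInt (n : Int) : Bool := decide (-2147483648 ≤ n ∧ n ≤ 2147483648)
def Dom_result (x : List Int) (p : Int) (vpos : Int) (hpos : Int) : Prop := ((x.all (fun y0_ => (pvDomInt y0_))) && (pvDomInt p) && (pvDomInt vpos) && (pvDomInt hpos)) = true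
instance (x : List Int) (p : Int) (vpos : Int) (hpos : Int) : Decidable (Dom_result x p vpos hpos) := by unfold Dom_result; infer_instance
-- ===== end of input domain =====

-- B composes the adjacent swaps into a sparse permutation dictionary (with a maintained
-- inverse) and answers with one lookup, instead of A's threading p through every update
-- (objective: alternative).
-- ===== PORT A =====
def update (p : Int) (h : Int) : Int :=
  if h == p - 1 then p - 1 else (if h == p then p + 1 else p)

-- the `for i, xi in enumerate(x)` loop of A, with i the running index
def resultLoop (x : List Int) (p : Int) (i : Int) (vpos : Int) (hpos : Int) : Int :=
  match x with
  | [] => p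
  | xi :: rest =>
      resultLoop rest (update (if i == vpos then update p hpos else p) xi) (i + 1) vpos hpos

def result (x : List Int) (p : Int) (vpos : Int) (hpos : Int) : Int :=
  let p := resultLoop x p 0 vpos hpos
  if (x.length : Int) == vpos then update p hpos else p

-- ===== PORT B =====
-- one swap h: a = inv.get(h,h); b = inv.get(h+1,h+1); fwd[a]=h+1; fwd[b]=h; inv[h]=b; inv[h+1]=a
def swapStep (s : PySem.Dict Int Int × PySem.Dict Int Int) (h : Int) :
    PySem.Dict Int Int × PySem.Dict Int Int :=
  ((s.1.insert (s.2.getD h h) (h + 1)).insert (s.2.getD (h + 1) (h + 1)) h,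
   (s.2.insert h (s.2.getD (h + 1) (h + 1))).insert (h + 1) (s.2.getD h h))

def result_alt (x : List Int) (p : Int) (vpos : Int) (hpos : Int) : Int :=
  let seq := if 0 ≤ vpos ∧ vpos ≤ (x.length : Int) then PySem.List.insert x vpos hpos else x
  let fi := seq.foldl swapStep (PySem.Dict.empty, PySem.Dict.empty)
  fi.1.getD p p

-- ===== PRECONDITION & SPEC =====
def Spec_result (x : List Int) (p : Int) (vpos : Int) (hpos : Int) (out : Int) : Prop := out = result_alt x p vpos hpos
instance (x : List Int) (p : Int) (vpos : Int) (hpos : Int) (out : Int) : Decidable (Spec_result x p vpos hpos out) := by unfold Spec_result; infer_instance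

-- ===== CLAIM (what is proved, stated in full; the proofs are below) =====
def Claim_equal_result : Prop := ∀ (x : List Int) (p : Int) (vpos : Int) (hpos : Int), Dom_result x p vpos hpos → Spec_result x p vpos hpos (result x p vpos hpos)

-- ===== LEMMAS AND PROOFS =====

-- A's loop never triggers the hpos update when vpos lies outside [i, i + len x)
theorem resultLoop_no_trigger (x : List Int) (p i vpos hpos : Int)
    (h : vpos < i ∨ i + (x.length : Int) ≤ vpos) :
    resultLoop x p i vpos hpos = x.foldl update p := by
  induction x generalizing p i with
  | nil => rfl
  | cons xi rest ih =>
      have hne : (i == vpos) = false := by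
        simp only [List.length_cons] at h
        simp only [beq_eq_false_iff_ne]
        omega
      simp only [resultLoop, hne, Bool.false_eq_true, if_false, List.foldl_cons]
      exact ih _ (i + 1) (by simp only [List.length_cons] at h; omega)

theorem resultLoop_trigger (x : List Int) (p i vpos hpos : Int)
    (h1 : i ≤ vpos) (h2 : vpos < i + (x.length : Int)) :
    resultLoop x p i vpos hpos =
      (x.take (vpos - i).toNat ++ hpos :: x.drop (vpos - i).toNat).foldl update p := by
  induction x generalizing p i with
  | nil => simp at h2; omega
  | cons xi rest ih =>
      by_cases hv : i = vpos
      · have : (i == vpos) = true := by simp [hv]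
        have hz : (vpos - i).toNat = 0 := by omega
        simp only [resultLoop, this, if_true, hz, List.take_zero, List.drop_zero,
          List.nil_append, List.foldl_cons]
        exact resultLoop_no_trigger rest _ (i + 1) vpos hpos (Or.inl (by omega))
      · have hne : (i == vpos) = false := by simp [hv]
        have hs : (vpos - i).toNat = (vpos - (i + 1)).toNat + 1 := by omega
        simp only [resultLoop, hne, Bool.false_eq_true, if_false, hs, List.take_succ_cons, List.drop_succ_cons,
          List.cons_append, List.foldl_cons]
        exact ih _ (i + 1) (by omega) (by simp only [List.length_cons] at h2; push_cast at h2 ⊢; omega)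

-- composing the swaps keeps fwd pointwise equal to the token-tracking fold,
-- provided fwd/inv are mutually inverse (as total maps with identity default)
theorem fold_swap (l : List Int) (fwd inv : PySem.Dict Int Int)
    (hGF : ∀ q, inv.getD (fwd.getD q q) (fwd.getD q q) = q)
    (hFG : ∀ r, fwd.getD (inv.getD r r) (inv.getD r r) = r)
    (q : Int) :
    (l.foldl swapStep (fwd, inv)).1.getD q q = l.foldl update (fwd.getD q q) := by
  induction l generalizing fwd inv q with
  | nil => rfl
  | cons h rest ih =>
      set a := inv.getD h h with ha
      set b := inv.getD (h + 1) (h + 1) with hb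
      have hFa : fwd.getD a a = h := hFG h
      have hFb : fwd.getD b b = h + 1 := hFG (h + 1)
      have hab : a ≠ b := fun e => by rw [e, hFb] at hFa; omega
      -- the updated dicts, as pointwise functions
      have hF' : ∀ q, ((fwd.insert a (h + 1)).insert b h).getD q q
          = (if q = b then h else if q = a then h + 1 else fwd.getD q q) := by
        intro q
        rw [PySem.Dict.getD_insert, PySem.Dict.getD_insert]
      have hG' : ∀ r, ((inv.insert h b).insert (h + 1) a).getD r r
          = (if r = h + 1 then a else if r = h then b else inv.getD r r) := by
        intro r
        rw [PySem.Dict.getD_insert, PySem.Dict.getD_insert]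
      -- injectivity facts needed below
      have hFinj : ∀ q', fwd.getD q' q' = h → q' = a := fun q' e => by
        have := hGF q'; rw [e] at this; rw [← this, ha]
      have hFinj' : ∀ q', fwd.getD q' q' = h + 1 → q' = b := fun q' e => by
        have := hGF q'; rw [e] at this; rw [← this, hb]
      have hGinj : ∀ r', inv.getD r' r' = a → r' = h := fun r' e => by
        have := hFG r'; rw [e, hFa] at this; omega
      have hGinj' : ∀ r', inv.getD r' r' = b → r' = h + 1 := fun r' e => by
        have := hFG r'; rw [e, hFb] at this; omega
      have hGF' : ∀ q, ((inv.insert h b).insert (h + 1) a).getD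
          (((fwd.insert a (h + 1)).insert b h).getD q q)
          (((fwd.insert a (h + 1)).insert b h).getD q q) = q := by
        intro q
        rw [hF']
        by_cases hqb : q = b
        · rw [if_pos hqb, hG', if_neg (by omega : h ≠ h + 1), if_pos rfl]
          exact hqb.symm
        · rw [if_neg hqb]
          by_cases hqa : q = a
          · rw [if_pos hqa, hG', if_pos rfl]; exact hqa.symm
          · rw [if_neg hqa, hG']
            have h1 : fwd.getD q q ≠ h + 1 := fun e => hqb (hFinj' q e)
            have h2 : fwd.getD q q ≠ h := fun e => hqa (hFinj q e)
            rw [if_neg h1, if_neg h2]; exact hGF q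
      have hFG' : ∀ r, ((fwd.insert a (h + 1)).insert b h).getD
          (((inv.insert h b).insert (h + 1) a).getD r r)
          (((inv.insert h b).insert (h + 1) a).getD r r) = r := by
        intro r
        rw [hG']
        by_cases hr1 : r = h + 1
        · rw [if_pos hr1, hF', if_neg hab, if_pos rfl]; exact hr1.symm
        · rw [if_neg hr1]
          by_cases hr0 : r = h
          · rw [if_pos hr0, hF', if_pos rfl]; exact hr0.symm
          · rw [if_neg hr0, hF']
            have h1 : inv.getD r r ≠ b := fun e => hr1 (hGinj' r e)
            have h2 : inv.getD r r ≠ a := fun e => hr0 (hGinj r e)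
            rw [if_neg h1, if_neg h2]; exact hFG r
      -- the swap applied to fwd is exactly `update · h`
      have hkey : ∀ q, ((fwd.insert a (h + 1)).insert b h).getD q q
          = update (fwd.getD q q) h := by
        intro q
        rw [hF']
        by_cases hqb : q = b
        · rw [if_pos hqb, hqb]; unfold update
          rw [hFb, if_pos (by simp)]
          omega
        · rw [if_neg hqb]
          by_cases hqa : q = a
          · rw [if_pos hqa, hqa]; unfold update
            rw [hFa, if_neg (by simp; omega), if_pos (by simp)]
          · rw [if_neg hqa]; unfold update
            have h1 : fwd.getD q q ≠ h + 1 := fun e => hqb (hFinj' q e)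
            have h2 : fwd.getD q q ≠ h := fun e => hqa (hFinj q e)
            rw [if_neg (by simp; omega), if_neg (by simp; omega)]
      have hstep : swapStep (fwd, inv) h
          = ((fwd.insert a (h + 1)).insert b h, (inv.insert h b).insert (h + 1) a) := rfl
      simp only [List.foldl_cons, hstep]
      rw [ih _ _ hGF' hFG' q, hkey q]

theorem fold_swap_empty (l : List Int) (p : Int) :
    (l.foldl swapStep (PySem.Dict.empty, PySem.Dict.empty)).1.getD p p = l.foldl update p := by
  have := fold_swap l PySem.Dict.empty PySem.Dict.empty
    (by intro q; simp [PySem.Dict.getD_empty])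
    (by intro r; simp [PySem.Dict.getD_empty]) p
  simpa [PySem.Dict.getD_empty] using this

-- ===== VERDICT (by name: the statement is the Claim_ definition above) =====
theorem result_spec : Claim_equal_result := by
  intro x p vpos hpos _
  unfold Spec_result result result_alt
  rw [fold_swap_empty]
  by_cases hlo : 0 ≤ vpos
  · by_cases hmid : vpos < (x.length : Int)
    · have hne : ((x.length : Int) == vpos) = false := by simp; omega
      have hc : 0 ≤ vpos ∧ vpos ≤ (x.length : Int) := ⟨hlo, le_of_lt hmid⟩
      have hins : PySem.List.insert x vpos hpos
          = x.take vpos.toNat ++ hpos :: x.drop vpos.toNat := by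
        have := PySem.List.insert_natCast x vpos.toNat hpos (by omega)
        rwa [Int.toNat_of_nonneg hlo] at this
      rw [if_pos hc, hins]
      simp only [hne, Bool.false_eq_true, if_false]
      have := resultLoop_trigger x p 0 vpos hpos hlo (by omega)
      simpa using this
    · by_cases heq : vpos = (x.length : Int)
      · have hb : ((x.length : Int) == vpos) = true := by simp [heq]
        have hc : 0 ≤ vpos ∧ vpos ≤ (x.length : Int) := ⟨hlo, by omega⟩
        have hins : PySem.List.insert x vpos hpos = x ++ [hpos] := by
          rw [heq]; exact_mod_cast PySem.List.insert_len x hpos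
        rw [if_pos hc, hins]
        simp only [hb, if_true, resultLoop_no_trigger x p 0 vpos hpos (Or.inr (by omega)),
          List.foldl_append, List.foldl_cons, List.foldl_nil]
      · have hne : ((x.length : Int) == vpos) = false := by simp [Ne.symm heq]
        rw [if_neg (by omega : ¬(0 ≤ vpos ∧ vpos ≤ (x.length : Int)))]
        simp only [hne, Bool.false_eq_true, if_false]
        exact resultLoop_no_trigger x p 0 vpos hpos (Or.inr (by omega))
  · have hne : ((x.length : Int) == vpos) = false := by simp; omega
    rw [if_neg (by omega : ¬(0 ≤ vpos ∧ vpos ≤ (x.length : Int)))]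
    simp only [hne, Bool.false_eq_true, if_false]
    exact resultLoop_no_trigger x p 0 vpos hpos (Or.inl (by omega))
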